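-- pv_equiv track=rewrite | github.com/texttest/texttest | texttestlib/testmodel.py | removeOptionsFromList
-- ===== SOURCE A (Python) =====
-- def removeOptionsFromList(optionArgs, option, argString):
--     optionPos = optionArgs.index(option)
--     oldArgList = optionArgs[optionPos + 1].split(",")
--     argList = argString.split(",")
--     for arg in argList:
--         if arg in oldArgList:
--             oldArgList.remove(arg)
--     optionArgsCopy = optionArgs[:]
--     optionArgsCopy[optionPos + 1] = ",".join(oldArgList)
--     return optionArgsCopy
-- ===== SOURCE B (Python) =====
-- def removeOptionsFromList(optionArgs, option, argString):
--     optionPos = optionArgs.index(option)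
--     oldArgList = optionArgs[optionPos + 1].split(",")
--     counts = {}
--     for arg in argString.split(","):
--         counts[arg] = counts.get(arg, 0) + 1
--     newArgList = []
--     for arg in oldArgList:
--         if counts.get(arg, 0) > 0:
--             counts[arg] = counts[arg] - 1
--         else:
--             newArgList.append(arg)
--     optionArgsCopy = optionArgs[:]
--     optionArgsCopy[optionPos + 1] = ",".join(newArgList)
--     return optionArgsCopy
-- ===== Notes on version B (the rewrite author's own statement) =====
-- stated objective: faster
-- what changed: Replaces A's per-arg membership test plus list.remove scan over the old list with a count dict built once from argString and a single pass over the old list that skips elements while their count lasts.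
-- outside the precondition, e.g. on removeOptionsFromList(['-o', 'a,b'], 'x', 'a'): A raises ValueError, B raises ValueError; on removeOptionsFromList(['a,b', '-o'], '-o', 'a'): A raises IndexError, B raises IndexError
import Mathlib
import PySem

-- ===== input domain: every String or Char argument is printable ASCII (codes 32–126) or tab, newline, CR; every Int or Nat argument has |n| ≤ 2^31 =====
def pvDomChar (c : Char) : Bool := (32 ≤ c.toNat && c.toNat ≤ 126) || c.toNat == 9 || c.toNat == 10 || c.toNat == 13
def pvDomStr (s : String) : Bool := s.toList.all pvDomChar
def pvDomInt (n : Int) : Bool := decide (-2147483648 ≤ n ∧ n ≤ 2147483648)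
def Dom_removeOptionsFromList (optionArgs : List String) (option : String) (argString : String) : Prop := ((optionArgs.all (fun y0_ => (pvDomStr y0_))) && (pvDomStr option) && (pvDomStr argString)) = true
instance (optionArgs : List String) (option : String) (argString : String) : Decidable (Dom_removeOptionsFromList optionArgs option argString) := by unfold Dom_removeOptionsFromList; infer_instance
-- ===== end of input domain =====

-- B replaces A's quadratic per-arg `in`/`remove` scans by a count dict built once and one pass over the old list; return value only.


-- ===== PORT A =====
def removeOptionsFromList (optionArgs : List String) (option : String) (argString : String) : List String :=
  let optionPos : Nat := (PySem.List.index? optionArgs option).getD 0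
  let oldArgList : List String := (PySem.Str.split? (PySem.List.pyGetD optionArgs ((optionPos : Int) + 1) "") ",").getD []
  let argList : List String := (PySem.Str.split? argString ",").getD []
  let final : List String := argList.foldl
    (fun old arg => if arg ∈ old then (PySem.List.remove? old arg).getD old else old) oldArgList
  PySem.List.pySetD optionArgs ((optionPos : Int) + 1) (PySem.Str.join "," final)

-- ===== PORT B =====
def pvFilterCounted (c : PySem.Dict String Int) : List String → List String
  | [] => []
  | x :: xs =>
    if c.getD x 0 > 0 then pvFilterCounted (c.insert x (c.getD x 0 - 1)) xs
    else x :: pvFilterCounted c xs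

def removeOptionsFromList_alt (optionArgs : List String) (option : String) (argString : String) : List String :=
  let optionPos : Nat := (PySem.List.index? optionArgs option).getD 0
  let oldArgList : List String := (PySem.Str.split? (PySem.List.pyGetD optionArgs ((optionPos : Int) + 1) "") ",").getD []
  let counts : PySem.Dict String Int :=
    ((PySem.Str.split? argString ",").getD []).foldl (fun d x => d.insert x (d.getD x 0 + 1)) PySem.Dict.empty
  let newArgList : List String := pvFilterCounted counts oldArgList
  PySem.List.pySetD optionArgs ((optionPos : Int) + 1) (PySem.Str.join "," newArgList)

-- ===== PRECONDITION & SPEC =====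
-- Pre_ excludes exactly the inputs where A raises: ValueError when option is absent,
-- IndexError when option's first occurrence is the last element.
def Pre_removeOptionsFromList (optionArgs : List String) (option : String) (argString : String) : Prop :=
  option ∈ optionArgs ∧ (PySem.List.index? optionArgs option).getD 0 + 1 < optionArgs.length
instance (optionArgs : List String) (option : String) (argString : String) : Decidable (Pre_removeOptionsFromList optionArgs option argString) := by unfold Pre_removeOptionsFromList; infer_instance

def pvWitness_removeOptionsFromList : List String × String × String := (["-o", "a,b,a"], "-o", "a,c")

def Spec_removeOptionsFromList (optionArgs : List String) (option : String) (argString : String) (out : List String) : Prop := out = removeOptionsFromList_alt optionArgs option argString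
instance (optionArgs : List String) (option : String) (argString : String) (out : List String) : Decidable (Spec_removeOptionsFromList optionArgs option argString out) := by unfold Spec_removeOptionsFromList; infer_instance

-- ===== CLAIM (what is proved, stated in full; the proofs are below) =====
def Claim_equal_removeOptionsFromList : Prop := ∀ (optionArgs : List String) (option : String) (argString : String), Dom_removeOptionsFromList optionArgs option argString → Pre_removeOptionsFromList optionArgs option argString → Spec_removeOptionsFromList optionArgs option argString (removeOptionsFromList optionArgs option argString)

-- ===== LEMMAS AND PROOFS =====

-- a purely functional count table, the common ground between the two loops
def pvFilt : List String → (String → Nat) → List String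
  | [], _ => []
  | x :: xs, c =>
    if c x > 0 then pvFilt xs (fun v => if v = x then c v - 1 else c v)
    else x :: pvFilt xs c

theorem pvFilt_zero (old : List String) : pvFilt old (fun _ => 0) = old := by
  induction old with
  | nil => rfl
  | cons x xs ih => simp [pvFilt, ih]

theorem pvFilt_bump (old : List String) (c : String → Nat) (a : String) :
    pvFilt old (fun v => if v = a then c v + 1 else c v) = pvFilt (old.erase a) c := by
  induction old generalizing c with
  | nil => rfl
  | cons x xs ih =>
    by_cases hxa : x = a
    · subst hxa
      simp only [pvFilt, List.erase_cons_head]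
      have : (fun v => if v = x then (if v = x then c v + 1 else c v) - 1 else if v = x then c v + 1 else c v) = c := by
        funext v; by_cases hv : v = x <;> simp [hv]
      simp [this]
    · rw [List.erase_cons_tail (by simpa using hxa)]
      by_cases hcx : c x > 0
      · have h1 : (if x = a then c x + 1 else c x) > 0 := by simp [hxa]; omega
        simp only [pvFilt, if_pos h1, if_pos hcx]
        have : (fun v => if v = x then (if v = a then c v + 1 else c v) - 1 else if v = a then c v + 1 else c v)
             = (fun v => if v = a then (if v = x then c v - 1 else c v) + 1 else if v = x then c v - 1 else c v) := by
          funext v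
          by_cases hv : v = x
          · subst hv; simp [hxa]
          · have hax : ¬ a = x := fun hh => hxa hh.symm
            by_cases hva : v = a <;> simp [hv, hva, hax]
        rw [this, ih]
      · have h1 : ¬ (if x = a then c x + 1 else c x) > 0 := by simp [hxa]; omega
        simp only [pvFilt, if_neg h1, if_neg hcx]
        rw [ih]

-- A's loop body is first-occurrence erasure
theorem pvStepA_eq_erase (old : List String) (a : String) :
    (if a ∈ old then (PySem.List.remove? old a).getD old else old) = old.erase a := by
  by_cases h : a ∈ old
  · rw [if_pos h, PySem.List.remove?_eq_some_erase old a h]; rfl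
  · rw [if_neg h, List.erase_of_not_mem h]

-- A's whole loop (rewritten to erase) computes pvFilt with the multiset of args
theorem pvFoldErase_eq_filt (args old : List String) :
    args.foldl (fun o a => o.erase a) old = pvFilt old (fun v => args.count v) := by
  induction args generalizing old with
  | nil => simp [pvFilt_zero]
  | cons a args ih =>
    simp only [List.foldl_cons, ih]
    have hc : (fun v => (a :: args).count v)
        = (fun v => if v = a then args.count v + 1 else args.count v) := by
      funext v
      by_cases hv : v = a
      · subst hv; simp
      · have hav : ¬ a = v := fun hh => hv hh.symm
        simp [hv, hav]
    rw [hc, pvFilt_bump]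

-- B's pass computes pvFilt with the dict's counts
theorem pvFilterCounted_eq_filt (old : List String) (c : PySem.Dict String Int) :
    pvFilterCounted c old = pvFilt old (fun v => (c.getD v 0).toNat) := by
  induction old generalizing c with
  | nil => rfl
  | cons x xs ih =>
    by_cases h : c.getD x 0 > 0
    · have hn : (c.getD x 0).toNat > 0 := by omega
      simp only [pvFilterCounted, pvFilt, if_pos h, if_pos hn, ih]
      congr 1
      funext v
      rw [PySem.Dict.getD_insert]
      by_cases hv : v = x
      · subst hv
        simp only [if_true]
        omega
      · simp only [if_neg hv]
    · have hn : ¬ (c.getD x 0).toNat > 0 := by omega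
      simp only [pvFilterCounted, pvFilt, if_neg h, if_neg hn, ih]

-- B's dict holds exactly the counts of argList
theorem pvCounts_eq (args : List String) :
    (fun v => ((args.foldl (fun d x => d.insert x (d.getD x 0 + 1)) (PySem.Dict.empty : PySem.Dict String Int)).getD v 0).toNat)
      = (fun v => args.count v) := by
  funext v
  rw [PySem.Dict.getD_foldl_insert_add_one]
  simp

-- ===== VERDICT (by name: the statement is the Claim_ definition above) =====
theorem removeOptionsFromList_spec : Claim_equal_removeOptionsFromList := by
  intro optionArgs option argString _ _
  unfold Spec_removeOptionsFromList removeOptionsFromList removeOptionsFromList_alt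
  have hstep : (fun (old : List String) (arg : String) =>
      if arg ∈ old then (PySem.List.remove? old arg).getD old else old)
      = (fun o a => o.erase a) := by
    funext o a; exact pvStepA_eq_erase o a
  simp only [hstep, pvFoldErase_eq_filt, pvFilterCounted_eq_filt, pvCounts_eq]
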